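-- pv_equiv track=rewrite | github.com/Raphaelle-Lemaire/Bert-and-multimodal-model-for-visuel-contextuel-text-classification | datasets/datasets/classif_datasets.py | select_label_and_index
-- ===== SOURCE A (Python) =====
-- def select_label_and_index(labels, index):
--     ones = [i for i, val in enumerate(labels) if val == 1]
--     zeros = [i for i, val in enumerate(labels) if val == 0]
--
--     if index % 2 == 0 and ones:
--         selected_index = ones[0]
--     elif index % 2 != 0 and zeros:
--         selected_index = zeros[0]
--     else:
--         return None, None
--
--     return labels[selected_index], selected_index
-- ===== SOURCE B (Python) =====
-- def select_label_and_index(labels, index):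
--     target = 1 if index % 2 == 0 else 0
--     i = 0
--     for val in labels:
--         if val == target:
--             return val, i
--         i += 1
--     return None, None
-- ===== Notes on version B (the rewrite author's own statement) =====
-- stated objective: simpler
-- what changed: Replaces building two full index lists (ones and zeros) plus parity-based selection with a single early-exiting scan for the one parity-determined target value.
import Mathlib
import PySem

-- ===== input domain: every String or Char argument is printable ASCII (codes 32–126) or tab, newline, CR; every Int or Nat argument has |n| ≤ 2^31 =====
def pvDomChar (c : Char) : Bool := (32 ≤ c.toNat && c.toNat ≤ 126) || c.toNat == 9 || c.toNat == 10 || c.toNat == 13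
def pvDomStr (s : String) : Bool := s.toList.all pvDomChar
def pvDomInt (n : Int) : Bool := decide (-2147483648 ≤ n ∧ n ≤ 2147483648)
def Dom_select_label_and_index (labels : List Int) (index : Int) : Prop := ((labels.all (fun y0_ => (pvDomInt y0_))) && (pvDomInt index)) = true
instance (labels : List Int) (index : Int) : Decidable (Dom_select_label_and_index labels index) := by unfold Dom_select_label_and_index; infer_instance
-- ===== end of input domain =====

-- B replaces A's two index-list comprehensions with one early-exiting scan for the parity-chosen target (simpler).

-- ===== PORT A =====
def select_label_and_index (labels : List Int) (index : Int) : Option Int × Option Int :=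
  let ones := ((PySem.List.enumerate labels 0).filter (fun p => p.2 == 1)).map (fun p => p.1)
  let zeros := ((PySem.List.enumerate labels 0).filter (fun p => p.2 == 0)).map (fun p => p.1)
  if PySem.Int.mod index 2 == 0 && !ones.isEmpty then
    -- ones[0]; in range because the guard ensures ones is nonempty
    let si := PySem.List.pyGetD ones 0 0
    (PySem.List.pyGet? labels si, some si)
  else if !(PySem.Int.mod index 2 == 0) && !zeros.isEmpty then
    let si := PySem.List.pyGetD zeros 0 0
    (PySem.List.pyGet? labels si, some si)
  else (none, none)

-- ===== PORT B =====
def slaiFind (target : Int) : List Int → Int → Option Int × Option Int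
  | [], _ => (none, none)
  | v :: rest, i => if v == target then (some v, some i) else slaiFind target rest (i + 1)

def select_label_and_index_alt (labels : List Int) (index : Int) : Option Int × Option Int :=
  let target : Int := if PySem.Int.mod index 2 == 0 then 1 else 0
  slaiFind target labels 0

-- ===== PRECONDITION & SPEC =====
def Spec_select_label_and_index (labels : List Int) (index : Int) (out : Option Int × Option Int) : Prop := out = select_label_and_index_alt labels index
instance (labels : List Int) (index : Int) (out : Option Int × Option Int) : Decidable (Spec_select_label_and_index labels index out) := by unfold Spec_select_label_and_index; infer_instance

-- ===== CLAIM (what is proved, stated in full; the proofs are below) =====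
def Claim_equal_select_label_and_index : Prop := ∀ (labels : List Int) (index : Int), Dom_select_label_and_index labels index → Spec_select_label_and_index labels index (select_label_and_index labels index)

-- ===== LEMMAS AND PROOFS =====

-- B's scan computes the head of A's filtered enumeration (value and index).
theorem slaiFind_eq_filter_head (t : Int) : ∀ (ls : List Int) (s : Int),
    slaiFind t ls s =
      match ((PySem.List.enumerate ls s).filter (fun p => p.2 == t)).head? with
      | some p => (some p.2, some p.1)
      | none => (none, none) := by
  intro ls
  induction ls with
  | nil => intro s; simp [slaiFind, PySem.List.enumerate_nil]
  | cons v rest ih =>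
    intro s
    rw [PySem.List.enumerate_cons]
    by_cases h : v = t
    · simp [slaiFind, h]
    · simp [slaiFind, h, ih (s + 1)]

-- The head of the filtered enumeration is a genuine (index, value) pair of the list.
theorem pyGet?_of_filter_head (t : Int) (ls : List Int) (p : Int × Int)
    (h : ((PySem.List.enumerate ls 0).filter (fun q => q.2 == t)).head? = some p) :
    PySem.List.pyGet? ls p.1 = some p.2 := by
  have hmem : p ∈ (PySem.List.enumerate ls 0).filter (fun q => q.2 == t) :=
    List.mem_of_mem_head? h
  have hmem' : p ∈ PySem.List.enumerate ls 0 := List.mem_of_mem_filter hmem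
  rw [PySem.List.mem_enumerate_iff] at hmem'
  obtain ⟨k, hk, rfl⟩ := hmem'
  simp [hk]

theorem slai_branch (t : Int) (ls : List Int) :
    (let flt := (PySem.List.enumerate ls 0).filter (fun p => p.2 == t)
     let idxs := flt.map (fun p => p.1)
     if !idxs.isEmpty then
       (PySem.List.pyGet? ls (PySem.List.pyGetD idxs 0 0), some (PySem.List.pyGetD idxs 0 0))
     else (none, none)) = slaiFind t ls 0 := by
  rw [slaiFind_eq_filter_head t ls 0]
  cases hf : (PySem.List.enumerate ls 0).filter (fun p => p.2 == t) with
  | nil => simp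
  | cons p fs =>
    have hget := pyGet?_of_filter_head t ls p (by rw [hf]; rfl)
    simp only [PySem.List.pyGet?, PySem.List.pyIdx?] at hget
    simp [PySem.List.pyGetD, PySem.List.pyGet?, PySem.List.pyIdx?, hget]

-- ===== VERDICT (by name: the statement is the Claim_ definition above) =====
theorem select_label_and_index_spec : Claim_equal_select_label_and_index := by
  intro labels index _
  unfold Spec_select_label_and_index select_label_and_index select_label_and_index_alt
  by_cases h : (PySem.Int.mod index 2 == 0) = true
  · simp only [h, Bool.true_and, Bool.not_true, Bool.false_and, Bool.false_eq_true,
      if_false, if_true]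
    exact slai_branch 1 labels
  · rw [Bool.not_eq_true] at h
    simp only [h, Bool.false_and, Bool.not_false, Bool.true_and, Bool.false_eq_true, if_false]
    exact slai_branch 0 labels
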